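-- pv_equiv track=rewrite | github.com/riedgar-ms/PyRIT | build_scripts/gen_api_md.py | _escape_docstring_examples
-- ===== SOURCE A (Python) =====
-- def _escape_docstring_examples(text: str) -> str:
--     """Wrap doctest-style examples (>>> lines) in code fences."""
--     lines = text.split("\n")
--     result: list[str] = []
--     in_example = False
--     for line in lines:
--         stripped = line.strip()
--         if stripped.startswith(">>>") and not in_example:
--             in_example = True
--             result.append("```python")
--             result.append(line)
--         elif in_example and stripped.startswith((">>>", "...")):
--             result.append(line)
--         elif in_example:
--             result.append("```")
--             in_example = False
--             result.append(line)
--         else: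
--             result.append(line)
--     if in_example:
--         result.append("```")
--     return "\n".join(result)
-- ===== SOURCE B (Python) =====
-- def _escape_docstring_examples(text: str) -> str:
--     """Wrap doctest-style examples (>>> lines) in code fences."""
--     lines = text.split("\n")
--     out: list[str] = []
--     i = 0
--     n = len(lines)
--     while i < n:
--         if lines[i].strip().startswith(">>>"):
--             # consume the whole doctest run at once
--             j = i
--             while j < n and lines[j].strip().startswith((">>>", "...")):
--                 j += 1
--             out.append("```python")
--             out.extend(lines[i:j])
--             out.append("```")
--             i = j
--         else:
--             out.append(lines[i])
--             i += 1
--     return "\n".join(out)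
-- ===== Notes on version B (the rewrite author's own statement) =====
-- stated objective: alternative
-- what changed: Replaces A's per-line in_example boolean state machine by chunk extraction: on meeting a doctest-opening line an inner scan consumes the whole example run at once and emits it wrapped in fences, so no flag is carried across iterations.
import Mathlib
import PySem

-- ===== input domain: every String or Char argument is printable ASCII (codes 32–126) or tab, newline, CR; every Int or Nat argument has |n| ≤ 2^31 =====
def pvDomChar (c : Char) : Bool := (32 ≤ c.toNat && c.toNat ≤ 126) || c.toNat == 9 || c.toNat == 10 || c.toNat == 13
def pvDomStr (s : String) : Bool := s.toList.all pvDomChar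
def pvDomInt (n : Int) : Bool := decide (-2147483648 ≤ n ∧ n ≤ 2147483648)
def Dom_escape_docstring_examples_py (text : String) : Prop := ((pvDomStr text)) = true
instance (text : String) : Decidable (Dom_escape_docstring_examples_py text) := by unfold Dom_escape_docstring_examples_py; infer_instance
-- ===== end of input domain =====

-- B replaces A's per-line in_example flag state machine by chunk extraction (each doctest run
-- is consumed and fenced in one inner scan); alternative decomposition, same cost, return value only.

-- ===== PORT A =====
-- text.split("\n") (sep nonempty, so split? is always some)
def pvSplitNL (text : String) : List String := (PySem.Str.split? text "\n").getD []
-- line.strip().startswith(">>>")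
def pvIsEx (l : String) : Bool := PySem.Str.startswith (PySem.Str.strip l) ">>>"
-- line.strip().startswith((">>>", "..."))
def pvIsCont (l : String) : Bool :=
  PySem.Str.startswith (PySem.Str.strip l) ">>>" || PySem.Str.startswith (PySem.Str.strip l) "..."

-- A's loop over the lines with the in_example flag; returns the emitted lines (the final
-- 'if in_example: result.append("```")' is the base case).
def pvGoA : List String → Bool → List String
  | [], inEx => if inEx then ["```"] else []
  | l :: ls, inEx =>
    if pvIsEx l && !inEx then "```python" :: l :: pvGoA ls true
    else if inEx && pvIsCont l then l :: pvGoA ls true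
    else if inEx then "```" :: l :: pvGoA ls false
    else l :: pvGoA ls false

def escape_docstring_examples_py (text : String) : String :=
  PySem.Str.join "\n" (pvGoA (pvSplitNL text) false)

-- ===== PORT B =====
-- Source B's outer while loop: on a '>>>' line the inner scan (takeWhile/dropWhile) consumes the
-- whole run lines[i:j] and emits it fenced; otherwise the line is emitted alone.
def pvChunksB : List String → List String
  | [] => []
  | l :: ls =>
    if pvIsEx l then
      "```python" :: (l :: ls.takeWhile pvIsCont) ++ "```" :: pvChunksB (ls.dropWhile pvIsCont)
    else l :: pvChunksB ls
termination_by ls => ls.length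
decreasing_by
  · exact Nat.lt_succ_of_le (List.length_dropWhile_le _ _)
  · simp

def escape_docstring_examples_py_alt (text : String) : String :=
  PySem.Str.join "\n" (pvChunksB (pvSplitNL text))

-- ===== PRECONDITION & SPEC =====
def Spec_escape_docstring_examples_py (text : String) (out : String) : Prop := out = escape_docstring_examples_py_alt text
instance (text : String) (out : String) : Decidable (Spec_escape_docstring_examples_py text out) := by unfold Spec_escape_docstring_examples_py; infer_instance

-- ===== CLAIM (what is proved, stated in full; the proofs are below) =====
def Claim_equal_escape_docstring_examples_py : Prop := ∀ (text : String), Dom_escape_docstring_examples_py text → Spec_escape_docstring_examples_py text (escape_docstring_examples_py text)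

-- ===== LEMMAS AND PROOFS =====

theorem pvIsEx_isCont {l : String} (h : pvIsEx l = true) : pvIsCont l = true := by
  simp [pvIsCont]; simp [pvIsEx] at h; exact Or.inl h

-- loop invariant: A's state-machine recursion from either flag value equals B's chunk recursion
theorem pvGo_eq_chunks (n : Nat) : ∀ ls : List String, ls.length ≤ n →
    pvGoA ls false = pvChunksB ls ∧
    pvGoA ls true = ls.takeWhile pvIsCont ++ "```" :: pvChunksB (ls.dropWhile pvIsCont) := by
  induction n with
  | zero =>
    intro ls h
    have : ls = [] := List.eq_nil_of_length_eq_zero (Nat.le_zero.mp h)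
    subst this
    simp [pvGoA, pvChunksB]
  | succ n ih =>
    intro ls h
    match ls with
    | [] => simp [pvGoA, pvChunksB]
    | l :: ls =>
      have hlen : ls.length ≤ n := Nat.lt_succ_iff.mp (by simpa using h)
      have ihF := (ih ls hlen).1
      have ihT := (ih ls hlen).2
      constructor
      · cases he : pvIsEx l with
        | true =>
          rw [pvGoA, pvChunksB]
          simp [he, ihT]
        | false =>
          rw [pvGoA, pvChunksB]
          simp [he, ihF]
      · cases hc : pvIsCont l with
        | true =>
          rw [pvGoA]
          simp [hc, ihT]
        | false =>
          have he : pvIsEx l = false := by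
            cases hx : pvIsEx l with
            | false => rfl
            | true => simp [pvIsEx_isCont hx] at hc
          rw [pvGoA, pvChunksB.eq_def]
          simp [he, hc, ihF]

-- ===== VERDICT (by name: the statement is the Claim_ definition above) =====
theorem escape_docstring_examples_py_spec : Claim_equal_escape_docstring_examples_py := by
  intro text _
  unfold Spec_escape_docstring_examples_py escape_docstring_examples_py escape_docstring_examples_py_alt
  rw [(pvGo_eq_chunks (pvSplitNL text).length (pvSplitNL text) le_rfl).1]
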